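-- pv_equiv track=rewrite | github.com/BoxRight/rule_convergence | methods/generate_thesis_documentation.py | _split_by_operator_at_level
-- ===== SOURCE A (Python) =====
-- from typing import List, Dict, Tuple, Optional
--
-- def _split_by_operator_at_level(expr: str, op: str) -> List[str]:
--     """Split expression by operator at top level, respecting parentheses"""
--     parts = []
--     depth = 0
--     current = ""
--
--     i = 0
--     while i < len(expr):
--         if expr[i] == '(':
--             depth += 1
--             current += expr[i]
--         elif expr[i] == ')':
--             depth -= 1
--             current += expr[i]
--         elif depth == 0 and i <= len(expr) - len(op) and expr[i:i+len(op)] == op: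
--             # Check it's a complete operator match
--             # Operator has spaces on both sides, so check boundaries
--             # Before: allow start, space, or closing parenthesis
--             before_ok = (i == 0) or (expr[i-1] in ' )')
--             # After: allow end, space, opening parenthesis, or any identifier char (since op ends with space)
--             # Actually, since operator ends with space, next char can be anything (it's the start of next token)
--             after_ok = True  # Operator ends with space, so next char is always valid
--             if before_ok and after_ok:
--                 if current.strip():
--                     parts.append(current.strip())
--                 current = ""
--                 i += len(op)
--                 continue
--             else:
--                 current += expr[i]
--         else:
--             current += expr[i]
--         i += 1
--
--     if current.strip():
--         parts.append(current.strip())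
--
--     return parts if parts else [expr]
-- ===== SOURCE B (Python) =====
-- def _split_by_operator_at_level(expr, op):
--     """Two-pass split: first collect top-level operator match positions, then cut."""
--     n, m = len(expr), len(op)
--     # pass 1: scan once, recording the start index of each accepted operator match
--     starts = []
--     depth = 0
--     i = 0
--     while i < n:
--         c = expr[i]
--         if c == '(':
--             depth += 1
--         elif c == ')':
--             depth -= 1
--         elif depth == 0 and expr[i:i+m] == op and (i == 0 or expr[i-1] in ' )'):
--             starts.append(i)
--             i += m
--             continue
--         i += 1
--     # pass 2: cut expr at the recorded matches, strip pieces, drop empty ones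
--     parts = []
--     prev = 0
--     for s in starts:
--         piece = expr[prev:s].strip()
--         if piece:
--             parts.append(piece)
--         prev = s + m
--     piece = expr[prev:].strip()
--     if piece:
--         parts.append(piece)
--     return parts if parts else [expr]
-- ===== Notes on version B (the rewrite author's own statement) =====
-- stated objective: alternative
-- what changed: Replaced A's single accumulate-and-flush scan (growing a 'current' buffer and flushing it at each operator match) by two passes: one scan that only records the start positions of accepted top-level operator matches, then a cutting pass that slices the expression between those positions, strips each piece and drops empty ones.
import Mathlib
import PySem

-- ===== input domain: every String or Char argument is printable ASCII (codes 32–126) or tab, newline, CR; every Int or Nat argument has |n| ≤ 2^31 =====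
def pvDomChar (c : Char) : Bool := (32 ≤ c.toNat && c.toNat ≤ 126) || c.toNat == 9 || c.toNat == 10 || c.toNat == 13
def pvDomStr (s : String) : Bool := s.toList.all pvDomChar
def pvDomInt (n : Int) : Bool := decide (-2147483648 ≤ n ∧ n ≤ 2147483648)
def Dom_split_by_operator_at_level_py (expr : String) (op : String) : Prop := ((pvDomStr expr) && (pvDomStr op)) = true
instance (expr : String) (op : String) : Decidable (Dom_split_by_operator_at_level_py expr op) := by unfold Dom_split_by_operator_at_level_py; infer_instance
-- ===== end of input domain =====

-- B replaces A's single accumulate-and-flush scan by two passes (collect match positions, then cut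
-- and strip the spans between them): a different decomposition of the same task, same cost.

-- `if piece.strip(): parts.append(piece.strip())`, shared by both ports
def pvPush (parts : List (List Char)) (s : List Char) : List (List Char) :=
  if s = [] then parts else parts ++ [s]

-- `parts if parts else [expr]` (parts kept as char lists, turned into strings here)
def pvWrap (expr : String) (parts : List (List Char)) : List String :=
  if parts = [] then [expr] else parts.map String.ofList

-- ===== PORT A =====
-- A's while-loop, fuel = expr.length+1 (each iteration advances i by ≥ 1 when op ≠ ""; on op = ""
-- with expr ≠ "" the Python loops forever — those inputs are outside Pre_ below).
-- Python's `i <= len(expr)-len(op) and expr[i:i+len(op)] == op` is ported as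
-- `(cs.drop i).take opL.length = opL`: when i > len-len(op) the slice is shorter than op, so the
-- equality is false either way.
def pvLoopA (cs opL : List Char) (f i : Nat) (depth : Int) (current : List Char)
    (parts : List (List Char)) : List (List Char) :=
  match f with
  | 0 => parts  -- fuel exhausted: unreachable under Pre_
  | f + 1 =>
    if i < cs.length then
      if cs.getD i ' ' = '(' then pvLoopA cs opL f (i+1) (depth+1) (current ++ [cs.getD i ' ']) parts
      else if cs.getD i ' ' = ')' then pvLoopA cs opL f (i+1) (depth-1) (current ++ [cs.getD i ' ']) parts
      else if depth = 0 ∧ (cs.drop i).take opL.length = opL ∧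
              (i = 0 ∨ cs.getD (i-1) ' ' = ' ' ∨ cs.getD (i-1) ' ' = ')') then
        pvLoopA cs opL f (i + opL.length) depth [] (pvPush parts (PySem.Chars.strip current))
      else pvLoopA cs opL f (i+1) depth (current ++ [cs.getD i ' ']) parts
    else pvPush parts (PySem.Chars.strip current)

def split_by_operator_at_level_py (expr : String) (op : String) : List String :=
  pvWrap expr (pvLoopA expr.toList op.toList (expr.toList.length + 1) 0 0 [] [])

-- ===== PORT B =====
-- pass 1: scan once recording the start index of each accepted top-level operator match (same fuel scheme)
def pvFindStarts (cs opL : List Char) (f i : Nat) (depth : Int) (acc : List Nat) : List Nat :=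
  match f with
  | 0 => acc
  | f + 1 =>
    if i < cs.length then
      if cs.getD i ' ' = '(' then pvFindStarts cs opL f (i+1) (depth+1) acc
      else if cs.getD i ' ' = ')' then pvFindStarts cs opL f (i+1) (depth-1) acc
      else if depth = 0 ∧ (cs.drop i).take opL.length = opL ∧
              (i = 0 ∨ cs.getD (i-1) ' ' = ' ' ∨ cs.getD (i-1) ' ' = ')') then
        pvFindStarts cs opL f (i + opL.length) depth (acc ++ [i])
      else pvFindStarts cs opL f (i+1) depth acc
    else acc

-- pass 2: cut expr at the recorded matches; expr[prev:p] = (cs.drop prev).take (p-prev) (indices in range here)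
def pvCutLoop (cs : List Char) (m prev : Nat) (starts : List Nat)
    (parts : List (List Char)) : List (List Char) :=
  match starts with
  | [] => pvPush parts (PySem.Chars.strip (cs.drop prev))
  | p :: ps => pvCutLoop cs m (p + m) ps (pvPush parts (PySem.Chars.strip ((cs.drop prev).take (p - prev))))

def split_by_operator_at_level_py_alt (expr : String) (op : String) : List String :=
  pvWrap expr (pvCutLoop expr.toList op.toList.length 0
    (pvFindStarts expr.toList op.toList (expr.toList.length + 1) 0 0 []) [])

-- ===== PRECONDITION & SPEC =====
-- Pre_ excludes op = "" with expr ≠ "": there the Python A never terminates (the empty operator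
-- matches at position 0 and `i += len(op)` does not advance).
def Pre_split_by_operator_at_level_py (expr : String) (op : String) : Prop :=
  op ≠ "" ∨ expr = ""
instance (expr : String) (op : String) : Decidable (Pre_split_by_operator_at_level_py expr op) := by
  unfold Pre_split_by_operator_at_level_py; infer_instance

def pvWitness_split_by_operator_at_level_py : String × String := ("a + (b + c)", "+")

def Spec_split_by_operator_at_level_py (expr : String) (op : String) (out : List String) : Prop :=
  out = split_by_operator_at_level_py_alt expr op
instance (expr : String) (op : String) (out : List String) :
    Decidable (Spec_split_by_operator_at_level_py expr op out) := by
  unfold Spec_split_by_operator_at_level_py; infer_instance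

-- ===== CLAIM (what is proved, stated in full; the proofs are below) =====
def Claim_equal_split_by_operator_at_level_py : Prop :=
  ∀ (expr : String) (op : String), Dom_split_by_operator_at_level_py expr op →
    Pre_split_by_operator_at_level_py expr op →
    Spec_split_by_operator_at_level_py expr op (split_by_operator_at_level_py expr op)

-- ===== LEMMAS AND PROOFS =====

theorem pvPush_eq (parts : List (List Char)) (s : List Char) :
    pvPush parts s = parts ++ pvPush [] s := by
  unfold pvPush; split <;> simp

-- proof-side: the parts contributed from position i onward, given the remaining match starts
def pvBuild (cs : List Char) (m : Nat) (cur : List Char) (i : Nat) : List Nat → List (List Char)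
  | [] => pvPush [] (PySem.Chars.strip (cur ++ cs.drop i))
  | p :: ps => pvPush [] (PySem.Chars.strip (cur ++ (cs.drop i).take (p - i))) ++ pvBuild cs m [] (p + m) ps

theorem pvCutLoop_eq_build (cs : List Char) (m : Nat) :
    ∀ (S : List Nat) (prev : Nat) (parts : List (List Char)),
      pvCutLoop cs m prev S parts = parts ++ pvBuild cs m [] prev S := by
  intro S
  induction S with
  | nil =>
      intro prev parts
      show pvPush parts _ = parts ++ pvBuild cs m [] prev []
      rw [pvBuild, List.nil_append, ← pvPush_eq]
  | cons p ps ih =>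
      intro prev parts
      show pvCutLoop cs m (p + m) ps _ = parts ++ pvBuild cs m [] prev (p :: ps)
      rw [ih, pvBuild, pvPush_eq parts, List.nil_append, List.append_assoc]

theorem pvFindStarts_acc (cs opL : List Char) :
    ∀ (f : Nat) (i : Nat) (d : Int) (acc : List Nat),
      pvFindStarts cs opL f i d acc = acc ++ pvFindStarts cs opL f i d [] := by
  intro f
  induction f with
  | zero => intro i d acc; simp [pvFindStarts]
  | succ f ih =>
      intro i d acc
      unfold pvFindStarts
      split_ifs
      · exact ih _ _ _
      · exact ih _ _ _
      · rw [ih _ _ (acc ++ [i]), ih _ _ ([] ++ [i])]; simp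
      · exact ih _ _ _
      · simp

theorem pvFindStarts_ge (cs opL : List Char) :
    ∀ (f : Nat) (i : Nat) (d : Int) (p : Nat),
      p ∈ pvFindStarts cs opL f i d [] → i ≤ p := by
  intro f
  induction f with
  | zero => intro i d p hp; simp [pvFindStarts] at hp
  | succ f ih =>
      intro i d p hp
      unfold pvFindStarts at hp
      split_ifs at hp
      · exact le_trans (Nat.le_succ i) (ih _ _ _ hp)
      · exact le_trans (Nat.le_succ i) (ih _ _ _ hp)
      · rw [pvFindStarts_acc] at hp
        simp at hp
        rcases hp with rfl | hp
        · exact le_refl _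
        · exact le_trans (Nat.le_add_right _ _) (ih _ _ _ hp)
      · exact le_trans (Nat.le_succ i) (ih _ _ _ hp)
      · simp at hp

theorem pvBuild_shift (cs : List Char) (m : Nat) (cur : List Char) (i : Nat)
    (hi : i < cs.length) (S : List Nat) (hS : ∀ p ∈ S, i + 1 ≤ p) :
    pvBuild cs m cur i S = pvBuild cs m (cur ++ [cs.getD i ' ']) (i + 1) S := by
  have hdrop : cs.drop i = cs.getD i ' ' :: cs.drop (i + 1) := by
    rw [List.getD_eq_getElem _ _ hi]
    exact List.drop_eq_getElem_cons hi
  cases S with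
  | nil => simp [pvBuild, hdrop]
  | cons p ps =>
      have hp : i + 1 ≤ p := hS p (by simp)
      have hsub : p - i = (p - (i+1)) + 1 := by omega
      simp [pvBuild, hdrop, hsub]

theorem pvLoopA_eq (cs opL : List Char) (hop : opL ≠ []) :
    ∀ (f : Nat) (i : Nat) (d : Int) (cur : List Char) (parts : List (List Char)),
      0 < f → cs.length < i + f →
      pvLoopA cs opL f i d cur parts =
        parts ++ pvBuild cs opL.length cur i (pvFindStarts cs opL f i d []) := by
  intro f
  induction f with
  | zero => intro i d cur parts hf _; omega
  | succ f ih =>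
      intro i d cur parts _ hfuel
      by_cases hi : i < cs.length
      · have hf : 0 < f := by omega
        have hm : 0 < opL.length := List.length_pos_iff.mpr hop
        unfold pvLoopA pvFindStarts
        rw [if_pos hi, if_pos hi]
        split_ifs
        · rw [ih _ _ _ _ hf (by omega),
              pvBuild_shift cs opL.length cur i hi _ (fun p hp => pvFindStarts_ge cs opL f (i+1) _ p hp)]
        · rw [ih _ _ _ _ hf (by omega),
              pvBuild_shift cs opL.length cur i hi _ (fun p hp => pvFindStarts_ge cs opL f (i+1) _ p hp)]
        · rw [ih _ _ _ _ hf (by omega), pvFindStarts_acc cs opL f (i + opL.length) d ([] ++ [i]),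
              List.nil_append, List.singleton_append, pvBuild, Nat.sub_self, List.take_zero,
              List.append_nil, pvPush_eq parts, List.append_assoc]
        · rw [ih _ _ _ _ hf (by omega),
              pvBuild_shift cs opL.length cur i hi _ (fun p hp => pvFindStarts_ge cs opL f (i+1) _ p hp)]
      · unfold pvLoopA pvFindStarts
        rw [if_neg hi, if_neg hi]
        have hdrop : cs.drop i = [] := List.drop_eq_nil_of_le (by omega)
        rw [pvBuild, hdrop, List.append_nil, pvPush_eq parts]

-- ===== VERDICT (by name: the statement is the Claim_ definition above) =====
theorem split_by_operator_at_level_py_spec : Claim_equal_split_by_operator_at_level_py := by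
  intro expr op _ hpre
  unfold Spec_split_by_operator_at_level_py
  unfold split_by_operator_at_level_py split_by_operator_at_level_py_alt
  rcases hpre with hop | hexpr
  · have hopL : op.toList ≠ [] := fun h => hop (by
      have := congrArg String.ofList h; simpa using this)
    rw [pvLoopA_eq expr.toList op.toList hopL (expr.toList.length + 1) 0 0 [] []
        (by omega) (by omega),
        pvCutLoop_eq_build, List.nil_append]
  · subst hexpr
    rfl
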